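-- pv_equiv track=rewrite | github.com/davidiach/erdos97 | src/erdos97/n9_base_apex.py | guaranteed_full_bases
-- ===== SOURCE A (Python) =====
-- from dataclasses import dataclass
--
-- @dataclass(frozen=True)
-- class CyclicBaseFamily:
--     """A cyclic base family, grouped by shorter cyclic length."""
--
--     cyclic_length: int
--     base_count: int
--     capacity_per_base: int
--     total_capacity: int
--
-- def cyclic_base_families(n: int = 9) -> list[CyclicBaseFamily]:
--     """Return cyclic base families by shorter cyclic length."""
--
--     if n < 3:
--         raise ValueError(f"n must be at least 3, got {n}")
--     families = []
--     for cyclic_length in range(1, n // 2 + 1):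
--         base_count = n if cyclic_length * 2 != n else n // 2
--         capacity_per_base = 1 if cyclic_length == 1 else 2
--         families.append(
--             CyclicBaseFamily(
--                 cyclic_length=cyclic_length,
--                 base_count=base_count,
--                 capacity_per_base=capacity_per_base,
--                 total_capacity=base_count * capacity_per_base,
--             )
--         )
--     return families
--
-- def guaranteed_full_bases(
--     n: int = 9,
--     capacity_deficit: int = 0,
--     cyclic_length: int = 2,
-- ) -> int:
--     """Conservative lower bound on fully saturated bases in one cyclic family.
--
--     A single missing apex can spoil full saturation of one base. With no
--     geometric information about where deficits land, this is the only
--     unconditional family-level guarantee.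
--     """
--
--     if capacity_deficit < 0:
--         raise ValueError(f"capacity_deficit must be nonnegative, got {capacity_deficit}")
--     family = next(
--         (
--             candidate
--             for candidate in cyclic_base_families(n)
--             if candidate.cyclic_length == cyclic_length
--         ),
--         None,
--     )
--     if family is None:
--         raise ValueError(f"cyclic_length {cyclic_length} is not available for n={n}")
--     return max(0, family.base_count - capacity_deficit)
-- ===== SOURCE B (Python) =====
-- def guaranteed_full_bases(
--     n: int = 9,
--     capacity_deficit: int = 0,
--     cyclic_length: int = 2,
-- ) -> int:
--     """Closed-form version: no family list is built or scanned."""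
--     if capacity_deficit < 0:
--         raise ValueError(f"capacity_deficit must be nonnegative, got {capacity_deficit}")
--     if n < 3:
--         raise ValueError(f"n must be at least 3, got {n}")
--     if cyclic_length < 1 or cyclic_length > n // 2:
--         raise ValueError(f"cyclic_length {cyclic_length} is not available for n={n}")
--     base_count = n if cyclic_length * 2 != n else n // 2
--     return max(0, base_count - capacity_deficit)
-- ===== Notes on version B (the rewrite author's own statement) =====
-- stated objective: simpler
-- what changed: B replaces building the whole list of cyclic base families and linearly scanning it for the matching cyclic_length with a direct range check and the closed-form base_count, raising the same exceptions in the same order.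
import Mathlib
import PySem

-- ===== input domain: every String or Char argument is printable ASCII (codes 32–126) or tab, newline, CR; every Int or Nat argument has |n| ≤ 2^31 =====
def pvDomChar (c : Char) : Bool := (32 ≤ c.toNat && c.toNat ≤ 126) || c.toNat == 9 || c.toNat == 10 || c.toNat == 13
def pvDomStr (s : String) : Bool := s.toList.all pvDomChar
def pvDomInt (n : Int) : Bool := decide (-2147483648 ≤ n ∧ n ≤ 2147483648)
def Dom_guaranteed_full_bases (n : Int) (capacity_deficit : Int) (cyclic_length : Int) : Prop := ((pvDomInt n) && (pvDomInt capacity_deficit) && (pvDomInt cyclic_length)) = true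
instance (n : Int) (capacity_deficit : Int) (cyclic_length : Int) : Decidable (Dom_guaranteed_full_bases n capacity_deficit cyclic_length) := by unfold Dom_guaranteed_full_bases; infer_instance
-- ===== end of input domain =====

-- B computes the answer in closed form (range check + arithmetic) instead of building the
-- list of cyclic base families and scanning it; raising inputs are excluded by Pre_.

-- ===== PORT A =====
-- cyclic_base_families: tuples are (cyclic_length, base_count, capacity_per_base, total_capacity)
def pvCyclicBaseFamilies (n : Int) : List (Int × Int × Int × Int) :=
  (PySem.List.pyRange 1 (PySem.Int.floordiv n 2 + 1) 1).foldl
    (fun families L =>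
      let base_count := if L * 2 ≠ n then n else PySem.Int.floordiv n 2
      let capacity_per_base : Int := if L = 1 then 1 else 2
      families ++ [(L, base_count, capacity_per_base, base_count * capacity_per_base)]) []

def guaranteed_full_bases (n : Int) (capacity_deficit : Int) (cyclic_length : Int) : Int :=
  -- capacity_deficit < 0 and n < 3 raise ValueError in Python: excluded by Pre_
  match (pvCyclicBaseFamilies n).find? (fun candidate => candidate.1 == cyclic_length) with
  | some family => max 0 (family.2.1 - capacity_deficit)
  | none => 0  -- Python raises ValueError here: excluded by Pre_

-- ===== PORT B =====
def guaranteed_full_bases_alt (n : Int) (capacity_deficit : Int) (cyclic_length : Int) : Int :=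
  if capacity_deficit < 0 then 0  -- raise in Python: excluded by Pre_
  else if n < 3 then 0            -- raise in Python: excluded by Pre_
  else if cyclic_length < 1 ∨ cyclic_length > PySem.Int.floordiv n 2 then 0  -- raise: excluded
  else
    let base_count := if cyclic_length * 2 ≠ n then n else PySem.Int.floordiv n 2
    max 0 (base_count - capacity_deficit)

-- ===== PRECONDITION & SPEC =====
-- Pre_ excludes exactly the inputs on which the Python raises ValueError:
-- negative capacity_deficit, n < 3, or cyclic_length outside 1..n//2.
def Pre_guaranteed_full_bases (n : Int) (capacity_deficit : Int) (cyclic_length : Int) : Prop :=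
  0 ≤ capacity_deficit ∧ 3 ≤ n ∧ 1 ≤ cyclic_length ∧ cyclic_length ≤ PySem.Int.floordiv n 2
instance (n : Int) (capacity_deficit : Int) (cyclic_length : Int) : Decidable (Pre_guaranteed_full_bases n capacity_deficit cyclic_length) := by unfold Pre_guaranteed_full_bases; infer_instance

def pvWitness_guaranteed_full_bases : Int × Int × Int := (9, 0, 2)

def Spec_guaranteed_full_bases (n : Int) (capacity_deficit : Int) (cyclic_length : Int) (out : Int) : Prop := out = guaranteed_full_bases_alt n capacity_deficit cyclic_length
instance (n : Int) (capacity_deficit : Int) (cyclic_length : Int) (out : Int) : Decidable (Spec_guaranteed_full_bases n capacity_deficit cyclic_length out) := by unfold Spec_guaranteed_full_bases; infer_instance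

-- ===== CLAIM (what is proved, stated in full; the proofs are below) =====
def Claim_equal_guaranteed_full_bases : Prop := ∀ (n : Int) (capacity_deficit : Int) (cyclic_length : Int), Dom_guaranteed_full_bases n capacity_deficit cyclic_length → Pre_guaranteed_full_bases n capacity_deficit cyclic_length → Spec_guaranteed_full_bases n capacity_deficit cyclic_length (guaranteed_full_bases n capacity_deficit cyclic_length)

-- ===== LEMMAS AND PROOFS =====

-- find? of an equality test over pyRange a b 1 finds cl iff a ≤ cl < b
theorem pv_find_pyRange (a b cl : Int) :
    (PySem.List.pyRange a b 1).find? (fun L => L == cl)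
      = if a ≤ cl ∧ cl < b then some cl else none := by
  by_cases hba : b ≤ a
  · rw [PySem.List.pyRange_one_eq_nil hba]
    simp only [List.find?_nil]
    rw [if_neg (by omega)]
  · have h : (b - a).toNat = (b - (a + 1)).toNat + 1 := by omega
    rw [PySem.List.pyRange_one_cons (by omega)]
    rw [List.find?_cons]
    by_cases hac : a = cl
    · subst hac
      simp only [beq_self_eq_true]
      rw [if_pos (by omega)]
    · rw [pv_find_pyRange (a + 1) b cl]
      have : (a == cl) = false := by simp [hac]
      rw [this]
      by_cases hcl : a + 1 ≤ cl ∧ cl < b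
      · rw [if_pos hcl, if_pos (by omega)]
      · rw [if_neg hcl, if_neg (by omega)]
termination_by (b - a).toNat
decreasing_by omega

theorem pv_families_eq (n : Int) :
    pvCyclicBaseFamilies n
      = (PySem.List.pyRange 1 (PySem.Int.floordiv n 2 + 1) 1).map
          (fun L => (L, if L * 2 ≠ n then n else PySem.Int.floordiv n 2,
                     if L = 1 then (1 : Int) else 2,
                     (if L * 2 ≠ n then n else PySem.Int.floordiv n 2) * (if L = 1 then (1 : Int) else 2))) := by
  unfold pvCyclicBaseFamilies
  rw [PySem.List.foldl_append_singleton_eq_map]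
  simp

-- ===== VERDICT (by name: the statement is the Claim_ definition above) =====
theorem guaranteed_full_bases_spec : Claim_equal_guaranteed_full_bases := by
  intro n cd cl _hdom hpre
  obtain ⟨hcd, hn, hcl1, hcl2⟩ := hpre
  unfold Spec_guaranteed_full_bases guaranteed_full_bases guaranteed_full_bases_alt
  rw [pv_families_eq, List.find?_map, Function.comp_def]
  simp only
  rw [pv_find_pyRange]
  rw [if_pos ⟨hcl1, by omega⟩]
  simp only [Option.map_some]
  split_ifs <;> first | rfl | omega
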